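-- pv_equiv track=rewrite | github.com/mvalentine65/summer_fun | two_two/post-order.py | binary_tree_search
-- ===== SOURCE A (Python) =====
-- def binary_tree_search(target, num, height):
--     """ Models a binary search of the tree. If the target
--     equals either viable child node number, returns the number
--     of the parent node. Otherwise calls itself on the viable
--     child node."""
--     if height < 1:
--         raise ValueError("Illegal height {}".format(height))
--     if target == num - 2**(height - 1) or target == num - 1:
--         return num
--     elif target < num - 2**(height - 1):
--         return binary_tree_search(target, num - 2**(height - 1), height-1)
--     else:
--         return binary_tree_search(target, num - 1, height - 1)
-- ===== SOURCE B (Python) =====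
-- def binary_tree_search(target, num, height):
--     # Iterative version tracking only the gap d = num - target and the height.
--     d = num - target
--     h = height
--     while True:
--         if h < 1:
--             raise ValueError("Illegal height {}".format(h))
--         half = 2 ** (h - 1)
--         if d == half or d == 1:
--             return target + d
--         if d > half:
--             d -= half
--         else:
--             d -= 1
--         h -= 1
-- ===== Notes on version B (the rewrite author's own statement) =====
-- stated objective: alternative
-- what changed: Replaces the recursion that rebuilds the node number at every level with an iterative while-loop over a single gap variable d = num - target and the height, returning target + d at the match.
import Mathlib
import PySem

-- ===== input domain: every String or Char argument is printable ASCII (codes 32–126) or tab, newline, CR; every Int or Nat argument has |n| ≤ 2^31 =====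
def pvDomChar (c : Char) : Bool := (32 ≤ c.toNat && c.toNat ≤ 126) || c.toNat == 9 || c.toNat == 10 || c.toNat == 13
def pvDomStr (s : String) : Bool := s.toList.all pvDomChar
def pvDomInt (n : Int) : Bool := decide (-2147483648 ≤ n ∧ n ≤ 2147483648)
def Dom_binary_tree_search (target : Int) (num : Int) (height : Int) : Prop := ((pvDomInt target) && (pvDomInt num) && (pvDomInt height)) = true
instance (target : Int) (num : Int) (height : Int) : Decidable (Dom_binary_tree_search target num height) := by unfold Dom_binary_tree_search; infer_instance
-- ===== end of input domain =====

-- B re-implements the recursive search as an iterative loop over the single gap d = num - target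
-- (alternative decomposition, same cost); return-value equivalence proved on Pre_ (where A returns).


-- ===== PORT A =====
-- Literal port of A's recursion; where Python raises ValueError (height < 1) the port
-- returns 0 — those inputs are excluded by Pre_binary_tree_search.
def binary_tree_search (target : Int) (num : Int) (height : Int) : Int :=
  if height < 1 then 0
  else if target = num - 2 ^ (height - 1).toNat ∨ target = num - 1 then num
  else if target < num - 2 ^ (height - 1).toNat then
    binary_tree_search target (num - 2 ^ (height - 1).toNat) (height - 1)
  else
    binary_tree_search target (num - 1) (height - 1)
termination_by height.toNat
decreasing_by all_goals omega

-- ===== PORT B =====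
-- B's while-loop over (d, h) only; returns the final gap d (Source B returns target + d).
def btsGap (d : Int) (h : Int) : Int :=
  if h < 1 then 0
  else if d = 2 ^ (h - 1).toNat ∨ d = 1 then d
  else if d > 2 ^ (h - 1).toNat then btsGap (d - 2 ^ (h - 1).toNat) (h - 1)
  else btsGap (d - 1) (h - 1)
termination_by h.toNat
decreasing_by all_goals omega

def binary_tree_search_alt (target : Int) (num : Int) (height : Int) : Int :=
  target + btsGap (num - target) height

-- ===== PRECONDITION & SPEC =====
-- Pre_ is exactly the set of inputs on which Python A returns normally; outside it
-- (height < 1 somewhere on the path) A raises ValueError (and so does B).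
def Pre_binary_tree_search (target : Int) (num : Int) (height : Int) : Prop :=
  1 ≤ height ∧ 0 < num - target ∧ num - target < 2 ^ height.toNat
instance (target : Int) (num : Int) (height : Int) : Decidable (Pre_binary_tree_search target num height) := by unfold Pre_binary_tree_search; infer_instance

def pvWitness_binary_tree_search : Int × Int × Int := (5, 7, 3)

def Spec_binary_tree_search (target : Int) (num : Int) (height : Int) (out : Int) : Prop := out = binary_tree_search_alt target num height
instance (target : Int) (num : Int) (height : Int) (out : Int) : Decidable (Spec_binary_tree_search target num height out) := by unfold Spec_binary_tree_search; infer_instance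

-- ===== CLAIM (what is proved, stated in full; the proofs are below) =====
def Claim_equal_binary_tree_search : Prop := ∀ (target : Int) (num : Int) (height : Int), Dom_binary_tree_search target num height → Pre_binary_tree_search target num height → Spec_binary_tree_search target num height (binary_tree_search target num height)

-- ===== LEMMAS AND PROOFS =====

lemma bts_eq_gap (n : Nat) :
    ∀ (target num height : Int), height.toNat ≤ n →
    1 ≤ height → 0 < num - target → num - target < 2 ^ height.toNat →
    binary_tree_search target num height = target + btsGap (num - target) height := by
  induction n with
  | zero =>
    intro target num height hn h1 _ _
    omega
  | succ n ih =>
    intro target num height hn h1 hd0 hdlt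
    have hnot : ¬ height < 1 := by omega
    have hto : height.toNat = (height - 1).toNat + 1 := by omega
    rw [binary_tree_search, btsGap]
    simp only [hnot, if_false]
    by_cases hm : num - target = 2 ^ (height - 1).toNat ∨ num - target = 1
    · have hm' : target = num - 2 ^ (height - 1).toNat ∨ target = num - 1 := by omega
      simp only [hm, hm', if_true]
      omega
    · have hm' : ¬ (target = num - 2 ^ (height - 1).toNat ∨ target = num - 1) := by
        push Not at hm ⊢; omega
      simp only [hm, hm', if_false]
      have hpow : (2 : Int) ^ height.toNat = 2 * 2 ^ (height - 1).toNat := by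
        rw [hto]; ring
      have hpow1 : (1 : Int) ≤ 2 ^ (height - 1).toNat := one_le_pow₀ (by norm_num)
      -- height = 1 would force num - target = 1, contradicting ¬hm
      have h2 : 2 ≤ height := by
        by_contra hlt
        have : height = 1 := by omega
        subst this
        simp at hto hdlt hm
        omega
      have hto1 : (height - 1).toNat = (height - 2).toNat + 1 := by omega
      have hpow' : (2 : Int) ^ (height - 1).toNat = 2 * 2 ^ (height - 2).toNat := by
        rw [hto1]; ring
      have hpow1' : (1 : Int) ≤ 2 ^ (height - 2).toNat := one_le_pow₀ (by norm_num)
      by_cases hl : target < num - 2 ^ (height - 1).toNat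
      · have hl' : num - target > 2 ^ (height - 1).toNat := by omega
        simp only [hl, hl', if_true]
        have := ih target (num - 2 ^ (height - 1).toNat) (height - 1) (by omega)
          (by omega) (by omega)
          (by have : (height - 1).toNat = height.toNat - 1 := by omega
              omega)
        rw [show num - 2 ^ (height - 1).toNat - target
              = num - target - 2 ^ (height - 1).toNat by ring] at this
        exact this
      · have hl' : ¬ (num - target > 2 ^ (height - 1).toNat) := by omega
        simp only [hl, hl', if_false]
        have := ih target (num - 1) (height - 1) (by omega)
          (by omega) (by push Not at hm; omega)
          (by push Not at hm hl; omega)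
        rw [show num - 1 - target = num - target - 1 by ring] at this
        exact this

-- ===== VERDICT (by name: the statement is the Claim_ definition above) =====
theorem binary_tree_search_spec : Claim_equal_binary_tree_search := by
  intro target num height _ hpre
  obtain ⟨h1, hd0, hdlt⟩ := hpre
  show _ = _
  unfold binary_tree_search_alt
  exact bts_eq_gap height.toNat target num height le_rfl h1 hd0 hdlt
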